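-- pv_equiv track=rewrite | github.com/bbnerino/JS-STUDY | code/Lv1/비밀지도.py | solution
-- ===== SOURCE A (Python) =====
-- def solution(n, arr1, arr2):
--     num1 = []
--     num2 = []
--     answer = []
--     for num in arr1:
--         str(bin(num))[2::]
--         ar1 = str(bin(num))[2::]
--         while len(ar1)<n:
--             ar1 = "0"+ar1
--         num1.append(list(ar1))
--
--     for num in (arr2):
--         ar2 = str(bin(num)[2::])
--         while len(ar2)<n:
--             ar2 = "0"+ar2
--         num2.append(list(ar2))
--
--
--     for i in range(len(num1)):
--         res = ''
--         for j in range(len(num1[i])):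
--             num = int(num1[i][j]) + int(num2[i][j])
--             if num == 0:
--                 res+=" "
--             else:
--                 res+="#"
--         answer.append(res)
--
--
--
--
--     return answer
-- ===== SOURCE B (Python) =====
-- def solution(n, arr1, arr2):
--     return [''.join('#' if c == '1' else ' ' for c in bin(a | b)[2:].zfill(n))
--             for a, b in zip(arr1, arr2)]
-- ===== Notes on version B (the rewrite author's own statement) =====
-- stated objective: simpler
-- what changed: B replaces A's three loops (two padding loops building per-number digit-character lists plus a nested per-position loop adding parsed digits) by one zip pass that computes the bitwise OR a|b per row and formats it directly with bin()/zfill(); Pre_ excludes inputs where A raises (negative numbers in a zipped row, arr1 longer than arr2, a row whose first padded binary string is wider than the second) and the out-of-spec rows whose two padded binary widths differ, where A silently compares only a prefix of the wider string.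
-- outside the precondition, e.g. on solution(1, [1], [2]): A returns ['#'], B returns ['##']
import Mathlib
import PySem

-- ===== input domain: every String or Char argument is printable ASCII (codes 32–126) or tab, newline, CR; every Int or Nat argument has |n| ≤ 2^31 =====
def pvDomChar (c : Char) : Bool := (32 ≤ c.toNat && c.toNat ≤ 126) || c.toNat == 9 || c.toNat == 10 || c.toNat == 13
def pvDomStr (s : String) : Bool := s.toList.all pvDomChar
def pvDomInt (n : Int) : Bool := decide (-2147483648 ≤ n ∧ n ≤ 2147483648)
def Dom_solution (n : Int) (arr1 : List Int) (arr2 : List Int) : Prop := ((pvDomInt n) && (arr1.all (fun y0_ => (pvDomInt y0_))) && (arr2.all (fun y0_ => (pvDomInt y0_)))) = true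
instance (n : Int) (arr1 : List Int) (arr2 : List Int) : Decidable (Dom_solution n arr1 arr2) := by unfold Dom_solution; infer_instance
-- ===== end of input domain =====

-- B renders each row as the binary string of the bitwise OR of the two numbers (simpler: one
-- pass, no per-digit char arrays); equivalence is about the return value only (A mutates nothing).

-- ===== PORT A =====
-- `while len(ar) < n: ar = "0" + ar`  (the identical padding loop of A's first two for-loops)
def padLoop (n : Int) (s : List Char) : List Char :=
  if (s.length : Int) < n then padLoop n ('0' :: s) else s
  termination_by (n - s.length).toNat
  decreasing_by simp only [List.length_cons]; omega

-- one element of `num1`/`num2`: `list(pad(str(bin(num))[2::]))` (strings kept as their char lists)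
def binRow (n : Int) (num : Int) : List Char :=
  padLoop n (PySem.Chars.slice (PySem.Int.pyBin num).toList (some 2) none)

def solution (n : Int) (arr1 : List Int) (arr2 : List Int) : List String :=
  let num1 := arr1.foldl (fun acc num => acc ++ [binRow n num]) []
  let num2 := arr2.foldl (fun acc num => acc ++ [binRow n num]) []
  (PySem.List.pyRange 0 (num1.length : Int)).foldl (fun answer i =>
    answer ++ [(PySem.List.pyRange 0 ((PySem.List.pyGetD num1 i []).length : Int)).foldl
      (fun res j =>
        -- `int(num1[i][j]) + int(num2[i][j])`; inside Pre_ the chars are '0'/'1', int() never raises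
        if ((PySem.Int.ofStr? (String.ofList [PySem.List.pyGetD (PySem.List.pyGetD num1 i []) j ' '])).getD 0
            + (PySem.Int.ofStr? (String.ofList [PySem.List.pyGetD (PySem.List.pyGetD num2 i []) j ' '])).getD 0) = 0
        then res ++ " " else res ++ "#") ""]) []

-- ===== PORT B =====
-- Source B: [''.join('#' if c == '1' else ' ' for c in bin(a | b)[2:].zfill(n)) for a, b in zip(arr1, arr2)]
def solution_alt (n : Int) (arr1 : List Int) (arr2 : List Int) : List String :=
  (arr1.zip arr2).map (fun p =>
    String.ofList ((PySem.Chars.zfill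
        (PySem.Chars.slice (PySem.Int.pyBin (PySem.Int.bor p.1 p.2)).toList (some 2) none) n).map
      (fun c => if c = '1' then '#' else ' ')))

-- ===== PRECONDITION & SPEC =====
-- width (in characters) of the padded binary string A builds for x (x ≥ 0): max(n, x.bit_length(), 1)
def binWidth (m : Nat) : Nat := if m = 0 then 1 else Nat.log2 m + 1
def pyWidth (n x : Int) : Nat := max n.toNat (binWidth x.toNat)

-- Pre_ excludes exactly: negative numbers in a zipped row (A raises ValueError on int('b')),
-- arr1 longer than arr2 (A raises IndexError), and rows whose two padded binary widths differ —
-- there the input is outside the problem's spec (a number wider than n bits) and A either raises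
-- IndexError or compares only a prefix of the wider string, a corner no caller would specify.
def Pre_solution (n : Int) (arr1 : List Int) (arr2 : List Int) : Prop :=
  arr1.length ≤ arr2.length ∧
  ∀ p ∈ arr1.zip arr2, 0 ≤ p.1 ∧ 0 ≤ p.2 ∧ pyWidth n p.1 = pyWidth n p.2

instance (n : Int) (arr1 : List Int) (arr2 : List Int) : Decidable (Pre_solution n arr1 arr2) := by
  unfold Pre_solution; infer_instance

def pvWitness_solution : Int × List Int × List Int := (3, [5, 0], [2, 1])

def Spec_solution (n : Int) (arr1 : List Int) (arr2 : List Int) (out : List String) : Prop := out = solution_alt n arr1 arr2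
instance (n : Int) (arr1 : List Int) (arr2 : List Int) (out : List String) : Decidable (Spec_solution n arr1 arr2 out) := by unfold Spec_solution; infer_instance

-- ===== CLAIM (what is proved, stated in full; the proofs are below) =====
def Claim_equal_solution : Prop := ∀ (n : Int) (arr1 : List Int) (arr2 : List Int), Dom_solution n arr1 arr2 → Pre_solution n arr1 arr2 → Spec_solution n arr1 arr2 (solution n arr1 arr2)

-- ===== LEMMAS AND PROOFS =====

-- the binary rendering of m at width L, most significant bit first
def bitsOf (L m : Nat) : List Char :=
  (List.range L).map (fun j => if m.testBit (L - 1 - j) then '1' else '0')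

theorem length_bitsOf (L m : Nat) : (bitsOf L m).length = L := by simp [bitsOf]

theorem lt_two_pow_binWidth (m : Nat) : m < 2 ^ binWidth m := by
  unfold binWidth; split
  · omega
  · exact Nat.lt_log2_self

theorem binWidth_le {m K : Nat} (h : m < 2 ^ K) (hK : 1 ≤ K) : binWidth m ≤ K := by
  unfold binWidth; split
  · exact hK
  · have := (Nat.log2_lt (by assumption)).mpr h; omega

theorem binWidth_pos (m : Nat) : 1 ≤ binWidth m := by
  unfold binWidth; split <;> omega

theorem binWidth_mono {m m' : Nat} (h : m ≤ m') : binWidth m ≤ binWidth m' := by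
  rcases Nat.eq_zero_or_pos m with hm | hm
  · subst hm; simpa [binWidth] using binWidth_pos m'
  · exact binWidth_le (Nat.lt_of_le_of_lt h (lt_two_pow_binWidth m')) (binWidth_pos m')

theorem bitsOf_succ (L m : Nat) :
    bitsOf (L + 1) m = (if m.testBit L then '1' else '0') :: bitsOf L m := by
  unfold bitsOf
  rw [List.range_succ_eq_map]
  simp only [List.map_cons, List.map_map, Nat.add_sub_cancel, Nat.sub_zero]
  congr 1
  apply List.map_congr_left
  intro j _
  have h1 : L - (j + 1) = L - 1 - j := by omega
  simp only [Function.comp_apply, Nat.succ_eq_add_one, h1]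

theorem bitsOf_succ_zero {L m : Nat} (h : m < 2 ^ L) :
    bitsOf (L + 1) m = '0' :: bitsOf L m := by
  rw [bitsOf_succ, Nat.testBit_lt_two_pow h]; simp

theorem replicate_append_bitsOf (d : Nat) {L m : Nat} (h : m < 2 ^ L) :
    List.replicate d '0' ++ bitsOf L m = bitsOf (L + d) m := by
  induction d with
  | zero => simp
  | succ d ih =>
    have hlt : m < 2 ^ (L + d) :=
      Nat.lt_of_lt_of_le h (Nat.pow_le_pow_right (by norm_num) (by omega))
    have : L + (d + 1) = (L + d) + 1 := by omega
    rw [this, bitsOf_succ_zero hlt, List.replicate_succ, List.cons_append, ih]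

theorem bitsOf_halve {n : Nat} (h2 : 2 ≤ n) :
    bitsOf (binWidth n) n = bitsOf (binWidth (n / 2)) (n / 2) ++ [(n % 2).digitChar] := by
  have hn : n ≠ 0 := by omega
  have hn2 : n / 2 ≠ 0 := by omega
  have hW : binWidth n = binWidth (n / 2) + 1 := by
    unfold binWidth
    rw [if_neg hn, if_neg hn2, Nat.log2_def]
    simp [h2]
  rw [hW]
  unfold bitsOf
  rw [List.range_succ, List.map_append]
  congr 1
  · apply List.map_congr_left
    intro j hj
    have hjL : j < binWidth (n / 2) := List.mem_range.mp hj
    have h1 : binWidth (n / 2) + 1 - 1 - j = (binWidth (n / 2) - 1 - j) + 1 := by omega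
    rw [h1, Nat.testBit_add_one]
  · simp only [List.map_cons, List.map_nil]
    have h0 : binWidth (n / 2) + 1 - 1 - binWidth (n / 2) = 0 := by omega
    rw [h0]
    rcases Nat.mod_two_eq_zero_or_one n with h | h
    · have hb : n.testBit 0 = false := by
        rcases Bool.eq_false_or_eq_true (n.testBit 0) with hb | hb
        · exact absurd (Nat.mod_two_eq_one_iff_testBit_zero.mpr hb) (by omega)
        · exact hb
      rw [h, hb]; decide
    · rw [h, Nat.mod_two_eq_one_iff_testBit_zero.mp h]; decide

theorem toDigitsCore_two (fuel : Nat) : ∀ (n : Nat) (acc : List Char), n < fuel →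
    Nat.toDigitsCore 2 fuel n acc = bitsOf (binWidth n) n ++ acc := by
  induction fuel with
  | zero => intro n acc h; omega
  | succ f ih =>
    intro n acc h
    rw [Nat.toDigitsCore]
    by_cases h2 : n / 2 = 0
    · rw [if_pos h2]
      have hn2 : n < 2 := by omega
      interval_cases n
      · exact (by decide : bitsOf (binWidth 0) 0 = ['0']) ▸ rfl
      · exact (by decide : bitsOf (binWidth 1) 1 = ['1']) ▸ rfl
    · rw [if_neg h2]
      have hn2 : 2 ≤ n := by omega
      rw [ih (n / 2) _ (by omega)]
      rw [bitsOf_halve hn2]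
      simp

theorem toDigits_two (n : Nat) : Nat.toDigits 2 n = bitsOf (binWidth n) n := by
  have := toDigitsCore_two (n + 1) n [] (Nat.lt_succ_self n)
  simpa [Nat.toDigits] using this

theorem padLoop_eq (n : Int) (s : List Char) :
    padLoop n s = List.replicate (n.toNat - s.length) '0' ++ s := by
  generalize hd : (n.toNat - s.length) = d
  induction d generalizing s with
  | zero =>
    rw [padLoop, if_neg (by omega)]
    simp
  | succ d ih =>
    rw [padLoop, if_pos (by omega)]
    rw [ih ('0' :: s) (by simp; omega)]
    rw [List.replicate_succ', List.append_assoc]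
    rfl

theorem zfill_eq (w : Int) (c : Char) (cs : List Char) (h1 : c ≠ '+') (h2 : c ≠ '-') :
    PySem.Chars.zfill (c :: cs) w = List.replicate (w.toNat - (c :: cs).length) '0' ++ (c :: cs) := by
  rw [PySem.Chars.zfill]
  by_cases hw : w ≤ ((c :: cs).length : Int)
  · rw [if_pos hw]
    have : w.toNat - (c :: cs).length = 0 := by omega
    rw [this]
    simp
  · rw [if_neg hw, if_neg (by simp [h1, h2])]

-- `bin(x)[2:]` for 0 ≤ x, as a char list
theorem binTail_eq {x : Int} (hx : 0 ≤ x) :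
    PySem.Chars.slice (PySem.Int.pyBin x).toList (some 2) none = bitsOf (binWidth x.toNat) x.toNat := by
  rw [PySem.Int.toList_pyBin, PySem.Chars.slice_eq_listSlice, PySem.Int.toBinChars0b,
    if_neg (by omega)]
  rw [show (2 : Int) = ((2 : Nat) : Int) from rfl, PySem.List.slice_from_natCast]
  simp [toDigits_two]

theorem pad_bits (t : Nat) (X : Nat) :
    List.replicate (t - binWidth X) '0' ++ bitsOf (binWidth X) X = bitsOf (max t (binWidth X)) X := by
  rw [replicate_append_bitsOf _ (lt_two_pow_binWidth X)]
  congr 1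
  omega

theorem rowA_eq (n : Int) {x : Int} (hx : 0 ≤ x) :
    binRow n x = bitsOf (pyWidth n x) x.toNat := by
  rw [binRow, binTail_eq hx, padLoop_eq, length_bitsOf, pad_bits]
  rfl

theorem rowB_eq (n : Int) {x : Int} (hx : 0 ≤ x) :
    PySem.Chars.zfill (PySem.Chars.slice (PySem.Int.pyBin x).toList (some 2) none) n
      = bitsOf (pyWidth n x) x.toNat := by
  rw [binTail_eq hx]
  obtain ⟨l, hl⟩ : ∃ l, binWidth x.toNat = l + 1 := ⟨binWidth x.toNat - 1, by
    have := binWidth_pos x.toNat; omega⟩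
  rw [hl, bitsOf_succ]
  rw [zfill_eq _ _ _ (by split <;> decide) (by split <;> decide)]
  rw [← bitsOf_succ, ← hl, length_bitsOf, pad_bits]
  rfl

theorem bor_width (n : Int) {a b : Int} (ha : 0 ≤ a) (hb : 0 ≤ b)
    (hw : pyWidth n a = pyWidth n b) :
    0 ≤ PySem.Int.bor a b ∧ (PySem.Int.bor a b).toNat = a.toNat ||| b.toNat ∧
      pyWidth n (PySem.Int.bor a b) = pyWidth n a := by
  rw [PySem.Int.bor_of_nonneg ha hb]
  refine ⟨by positivity, Int.toNat_natCast _, ?_⟩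
  unfold pyWidth at hw ⊢
  rw [Int.toNat_natCast]
  have h1 : binWidth a.toNat ≤ binWidth (a.toNat ||| b.toNat) := binWidth_mono (Nat.left_le_or)
  have h2 : a.toNat ||| b.toNat < 2 ^ max (binWidth a.toNat) (binWidth b.toNat) :=
    Nat.or_lt_two_pow
      (Nat.lt_of_lt_of_le (lt_two_pow_binWidth _) (Nat.pow_le_pow_right (by norm_num) (le_max_left _ _)))
      (Nat.lt_of_lt_of_le (lt_two_pow_binWidth _) (Nat.pow_le_pow_right (by norm_num) (le_max_right _ _)))
  have h3 : binWidth (a.toNat ||| b.toNat) ≤ max (binWidth a.toNat) (binWidth b.toNat) :=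
    binWidth_le h2 (le_trans (binWidth_pos a.toNat) (le_max_left _ _))
  omega

theorem foldl_str {α : Type} (p : α → Prop) [DecidablePred p] :
    ∀ (l : List α) (acc : String),
    (l.foldl (fun res x => if p x then res ++ " " else res ++ "#") acc).toList
      = acc.toList ++ l.map (fun x => if p x then ' ' else '#') := by
  intro l
  induction l with
  | nil => intro acc; simp
  | cons x xs ih =>
    intro acc
    by_cases h : p x <;> simp [h, ih, String.toList_append]

theorem cond_char (s t : Bool) :
    (((PySem.Int.ofStr? (String.ofList [if s then '1' else '0'])).getD 0
      + (PySem.Int.ofStr? (String.ofList [if t then '1' else '0'])).getD 0) = 0)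
      ↔ (s = false ∧ t = false) := by
  cases s <;> cases t <;> decide

theorem getD_bitsOf {L m k : Nat} (h : k < L) (d : Char) :
    (bitsOf L m).getD k d = if m.testBit (L - 1 - k) then '1' else '0' := by
  unfold bitsOf
  rw [List.getD_eq_getElem _ _ (by simpa using h)]
  simp

theorem row_eq (n : Int) {a b : Int} (ha : 0 ≤ a) (hb : 0 ≤ b)
    (hw : pyWidth n a = pyWidth n b) :
    (PySem.List.pyRange 0 ((binRow n a).length : Int)).foldl
      (fun res j =>
        if ((PySem.Int.ofStr? (String.ofList [PySem.List.pyGetD (binRow n a) j ' '])).getD 0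
            + (PySem.Int.ofStr? (String.ofList [PySem.List.pyGetD (binRow n b) j ' '])).getD 0) = 0
        then res ++ " " else res ++ "#") ""
      = String.ofList ((PySem.Chars.zfill
          (PySem.Chars.slice (PySem.Int.pyBin (PySem.Int.bor a b)).toList (some 2) none) n).map
        (fun c => if c = '1' then '#' else ' ')) := by
  obtain ⟨hge, htn, hworb⟩ := bor_width n ha hb hw
  rw [rowB_eq n hge, htn, hworb]
  rw [rowA_eq n ha, rowA_eq n hb, ← hw, length_bitsOf]
  rw [PySem.List.pyRange_one]
  simp only [Int.sub_zero, Int.toNat_natCast, List.foldl_map, zero_add]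
  have hcong := PySem.List.foldl_congr_mem (List.range (pyWidth n a))
    (fun (x : String) (y : Nat) =>
      if (PySem.Int.ofStr? (String.ofList [PySem.List.pyGetD (bitsOf (pyWidth n a) a.toNat) (↑y) ' '])).getD 0 +
         (PySem.Int.ofStr? (String.ofList [PySem.List.pyGetD (bitsOf (pyWidth n a) b.toNat) (↑y) ' '])).getD 0 = 0
      then x ++ " " else x ++ "#")
    (fun (res : String) (k : Nat) =>
      if (a.toNat.testBit (pyWidth n a - 1 - k) = false ∧ b.toNat.testBit (pyWidth n a - 1 - k) = false)
      then res ++ " " else res ++ "#") ""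
    (by
      intro acc k hk
      have hkK : k < pyWidth n a := List.mem_range.mp hk
      dsimp only
      rw [PySem.List.pyGetD_natCast, PySem.List.pyGetD_natCast, getD_bitsOf hkK, getD_bitsOf hkK]
      exact if_congr (cond_char _ _) rfl rfl)
  rw [hcong, ← String.toList_inj]
  rw [foldl_str (fun k : Nat =>
    (a.toNat.testBit (pyWidth n a - 1 - k) = false ∧ b.toNat.testBit (pyWidth n a - 1 - k) = false))]
  simp only [String.toList_ofList, bitsOf, List.map_map]
  apply List.map_congr_left
  intro k hk
  rw [Function.comp_apply, Nat.testBit_lor]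
  cases hA : a.toNat.testBit (pyWidth n a - 1 - k) <;>
    cases hB : b.toNat.testBit (pyWidth n a - 1 - k) <;> simp

-- ===== VERDICT (by name: the statement is the Claim_ definition above) =====
theorem solution_spec : Claim_equal_solution := by
  intro n arr1 arr2 _ hpre
  obtain ⟨hlen, hzip⟩ := hpre
  unfold Spec_solution solution solution_alt
  simp only [PySem.List.foldl_append_singleton_eq_map, List.nil_append, List.length_map]
  rw [PySem.List.pyRange_one]
  simp only [Int.sub_zero, Int.toNat_natCast, List.map_map, zero_add]
  apply List.ext_getElem
  · simp [List.length_zip]; omega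
  · intro i h1 h2
    simp only [List.length_map, List.length_range] at h1
    have hi1 : i < arr1.length := h1
    have hi2 : i < arr2.length := by omega
    simp only [List.getElem_map, List.getElem_range, Function.comp_apply, List.getElem_zip]
    have hg1 : PySem.List.pyGetD (arr1.map (binRow n)) (↑i) [] = binRow n arr1[i] := by
      rw [PySem.List.pyGetD_natCast, List.getD_eq_getElem _ _ (by simpa using hi1)]
      simp
    have hg2 : PySem.List.pyGetD (arr2.map (binRow n)) (↑i) [] = binRow n arr2[i] := by
      rw [PySem.List.pyGetD_natCast, List.getD_eq_getElem _ _ (by simpa using hi2)]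
      simp
    rw [hg1, hg2]
    have hmem : (arr1[i], arr2[i]) ∈ arr1.zip arr2 := by
      have hz : i < (arr1.zip arr2).length := by simp [List.length_zip]; omega
      have := List.getElem_mem hz
      rwa [List.getElem_zip] at this
    obtain ⟨ha, hb, hww⟩ := hzip _ hmem
    exact row_eq n ha hb hww
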